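-- pv_equiv track=rewrite | github.com/Emmanuelsv/desafio_programacion_python_2497404 | 01_desafios_texto_emmanuel/01_02_primera_letra_repetida.py | buscar_primera_repetida
-- ===== SOURCE A (Python) =====
-- def buscar_primera_repetida(t):
--   r = []
--   t = t.lower()
--   texto = t.replace(" ","")
--
--   n = len(texto)
--   for i in range(n-1):
--     for j in range(n-i-1):
--       if texto[i]==texto[j+i+1]:
--         r.append(texto[i])
--         break
--   if len(r) == 1:
--    return r
--   else:
--     return r.append(None)
-- ===== SOURCE B (Python) =====
-- def buscar_primera_repetida(t):
--   texto = t.lower().replace(" ", "")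
--   seen = set()
--   rep = []
--   for ch in texto:
--     if ch in seen:
--       rep.append(ch)
--     else:
--       seen.add(ch)
--   if len(rep) == 1:
--     return rep
--   return None
-- ===== Notes on version B (the rewrite author's own statement) =====
-- stated objective: faster
-- what changed: Replaced A's O(n^2) nested index loops (for each position, scan the rest for a later equal char) by a single pass with a seen-set that collects every repeated occurrence, using the fact that both counts equal len(texto) minus the number of distinct chars.
import Mathlib
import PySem

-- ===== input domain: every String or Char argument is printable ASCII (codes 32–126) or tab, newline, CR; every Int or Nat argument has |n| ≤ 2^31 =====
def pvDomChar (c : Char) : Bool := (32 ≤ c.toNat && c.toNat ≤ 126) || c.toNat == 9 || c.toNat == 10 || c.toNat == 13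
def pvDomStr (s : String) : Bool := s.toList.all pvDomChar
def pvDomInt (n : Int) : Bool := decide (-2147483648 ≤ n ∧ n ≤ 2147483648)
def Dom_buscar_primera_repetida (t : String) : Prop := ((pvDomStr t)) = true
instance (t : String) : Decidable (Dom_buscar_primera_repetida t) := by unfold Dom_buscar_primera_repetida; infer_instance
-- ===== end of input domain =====

-- B replaces A's O(n^2) nested index loops by one linear pass with a seen-set; proved to return the same value on every input.

set_option maxHeartbeats 1000000

-- ===== PORT A =====
-- inner loop 'for j in range(n-i-1): if texto[i]==texto[j+i+1]: r.append(texto[i]); break'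
def pvInnerA (texto : List Char) (i : Int) (r : List String) : List Int → List String
  | [] => r
  | _j :: rest =>
      if PySem.List.pyGetD texto i ' ' = PySem.List.pyGetD texto (_j + i + 1) ' '
      then r ++ [String.ofList [PySem.List.pyGetD texto i ' ']]
      else pvInnerA texto i r rest

def buscar_primera_repetida (t : String) : Option (List String) :=
  let t1 := PySem.Str.lower t
  let texto := (PySem.Str.replace t1 " " "").toList
  let n : Int := texto.length
  let r : List String :=
    (PySem.List.pyRange 0 (n - 1) 1).foldl
      (fun r i => pvInnerA texto i r (PySem.List.pyRange 0 (n - i - 1) 1)) []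
  if r.length = 1 then some r else none

-- ===== PORT B =====
def buscar_primera_repetida_alt (t : String) : Option (List String) :=
  let texto := (PySem.Str.replace (PySem.Str.lower t) " " "").toList
  let p : PySem.Set Char × List String :=
    texto.foldl
      (fun p ch =>
        if PySem.Set.contains p.1 ch then (p.1, p.2 ++ [String.ofList [ch]])
        else (PySem.Set.add p.1 ch, p.2))
      (PySem.Set.empty, [])
  if p.2.length = 1 then some p.2 else none

-- ===== PRECONDITION & SPEC =====
def Spec_buscar_primera_repetida (t : String) (out : Option (List String)) : Prop := out = buscar_primera_repetida_alt t
instance (t : String) (out : Option (List String)) : Decidable (Spec_buscar_primera_repetida t out) := by unfold Spec_buscar_primera_repetida; infer_instance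

-- ===== CLAIM (what is proved, stated in full; the proofs are below) =====
def Claim_equal_buscar_primera_repetida : Prop := ∀ (t : String), Dom_buscar_primera_repetida t → Spec_buscar_primera_repetida t (buscar_primera_repetida t)

-- ===== LEMMAS AND PROOFS =====

-- chars (as 1-char strings) having a LATER equal occurrence: what A's nested loops collect
def pvFdup : List Char → List String
  | [] => []
  | c :: tl => (if c ∈ tl then [String.ofList [c]] else []) ++ pvFdup tl

-- chars (as 1-char strings) having an EARLIER equal occurrence: what B's single pass collects
def pvGdup (seen : PySem.Set Char) : List Char → List String
  | [] => []
  | c :: tl =>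
      if PySem.Set.contains seen c then String.ofList [c] :: pvGdup seen tl
      else pvGdup (PySem.Set.add seen c) tl

theorem pvGetD_nat (l : List Char) (k : Nat) (hk : k < l.length) :
    PySem.List.pyGetD l (k : Int) ' ' = l[k] := by
  rw [PySem.List.pyGetD_natCast]
  exact List.getD_eq_getElem l ' ' hk

theorem pvSingle {α : Type} (xs : List α) (h : xs.length = 1) : ∃ a, xs = [a] := by
  match xs, h with
  | [a], _ => exact ⟨a, rfl⟩

theorem pvInnerA_eq (texto : List Char) (i : Int) (r : List String) (js : List Int) :
    pvInnerA texto i r js =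
      if js.any (fun j => decide (PySem.List.pyGetD texto i ' ' = PySem.List.pyGetD texto (j + i + 1) ' '))
      then r ++ [String.ofList [PySem.List.pyGetD texto i ' ']] else r := by
  induction js with
  | nil => simp [pvInnerA]
  | cons j rest ih =>
      by_cases h : PySem.List.pyGetD texto i ' ' = PySem.List.pyGetD texto (j + i + 1) ' ' <;>
        simp [pvInnerA, h, ih]

-- the inner break-loop fires at index i exactly when texto[i] occurs again later
theorem pvCondA (l : List Char) (i : Nat) (hi : i < l.length) :
    ((PySem.List.pyRange 0 ((l.length : Int) - (i : Int) - 1) 1).any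
      (fun j => decide (PySem.List.pyGetD l (i : Int) ' ' = PySem.List.pyGetD l (j + (i : Int) + 1) ' '))) = true
    ↔ l[i] ∈ l.drop (i + 1) := by
  simp only [List.any_eq_true, PySem.List.mem_pyRange_one, decide_eq_true_eq]
  constructor
  · rintro ⟨j, ⟨h0, h1⟩, heq⟩
    have hj : j + (i : Int) + 1 = ((i + 1 + j.toNat : Nat) : Int) := by omega
    have hjn : i + 1 + j.toNat < l.length := by omega
    rw [hj, pvGetD_nat l i hi, pvGetD_nat l _ hjn] at heq
    have hlt : j.toNat < (l.drop (i + 1)).length := by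
      simp only [List.length_drop]; omega
    have hd : (l.drop (i + 1))[j.toNat] = l[i] := by
      rw [List.getElem_drop]; exact heq.symm
    rw [← hd]
    exact List.getElem_mem hlt
  · intro hmem
    obtain ⟨m, hm, hget⟩ := List.getElem_of_mem hmem
    rw [List.getElem_drop] at hget
    have hmlen : m < l.length - (i + 1) := by
      simpa only [List.length_drop] using hm
    refine ⟨(m : Int), ⟨by omega, by omega⟩, ?_⟩
    have hj : (m : Int) + (i : Int) + 1 = ((i + 1 + m : Nat) : Int) := by omega
    rw [hj, pvGetD_nat l i hi, pvGetD_nat l _ (by omega)]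
    exact hget.symm

-- the outer loop of A accumulates pvFdup of the remaining suffix
theorem pvOuterA (l : List Char) : ∀ (m k : Nat) (r : List String), l.length - k = m →
    (PySem.List.pyRange (k : Int) ((l.length : Int) - 1) 1).foldl
      (fun r i => pvInnerA l i r (PySem.List.pyRange 0 ((l.length : Int) - i - 1) 1)) r
    = r ++ pvFdup (l.drop k) := by
  intro m
  induction m with
  | zero =>
      intro k r hm
      rw [PySem.List.pyRange_one_eq_nil (by omega), List.drop_eq_nil_of_le (by omega)]
      simp [pvFdup]
  | succ m ih =>
      intro k r hm
      have hk : k < l.length := by omega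
      have hdrop : l.drop k = l[k] :: l.drop (k + 1) := by
        exact List.drop_eq_getElem_cons hk
      by_cases h2 : k + 1 = l.length
      · rw [PySem.List.pyRange_one_eq_nil (by omega)]
        have hnil : l.drop (k + 1) = [] := List.drop_eq_nil_of_le (by omega)
        rw [hdrop, hnil]
        simp [pvFdup]
      · have hklen : k + 1 < l.length := by omega
        rw [PySem.List.pyRange_one_cons (by omega), List.foldl_cons]
        have hstep : pvInnerA l (k : Int) r (PySem.List.pyRange 0 ((l.length : Int) - (k : Int) - 1) 1)
            = r ++ (if l[k] ∈ l.drop (k + 1) then [String.ofList [l[k]]] else []) := by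
          rw [pvInnerA_eq]
          by_cases hmem : l[k] ∈ l.drop (k + 1)
          · rw [if_pos ((pvCondA l k hk).mpr hmem), if_pos hmem, pvGetD_nat l k hk]
          · rw [if_neg (fun hc => hmem ((pvCondA l k hk).mp hc)), if_neg hmem, List.append_nil]
        rw [hstep]
        have hcast : ((k : Int) + 1) = ((k + 1 : Nat) : Int) := by push_cast; ring
        rw [hcast, ih (k + 1) _ (by omega), hdrop]
        simp [pvFdup]

-- B's fold accumulates pvGdup
theorem pvFoldB : ∀ (suf : List Char) (seen : PySem.Set Char) (r : List String),
    (suf.foldl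
      (fun (p : PySem.Set Char × List String) ch =>
        if PySem.Set.contains p.1 ch then (p.1, p.2 ++ [String.ofList [ch]])
        else (PySem.Set.add p.1 ch, p.2))
      (seen, r)).2 = r ++ pvGdup seen suf := by
  intro suf
  induction suf with
  | nil => intro seen r; simp [pvGdup]
  | cons c tl ih =>
      intro seen r
      by_cases h : PySem.Set.contains seen c
      · simp only [List.foldl_cons, h, if_true, pvGdup, ih]
        simp
      · simp only [List.foldl_cons, h, pvGdup, ih]
        simp

theorem pvLenFdup : ∀ (l : List Char), (pvFdup l).length + l.toFinset.card = l.length := by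
  intro l
  induction l with
  | nil => simp [pvFdup]
  | cons c tl ih =>
      by_cases h : c ∈ tl
      · have hins : insert c tl.toFinset = tl.toFinset :=
          Finset.insert_eq_self.mpr (List.mem_toFinset.mpr h)
        simp only [pvFdup, h, if_true, List.toFinset_cons, hins, List.length_append,
          List.length_cons, List.length_nil]
        omega
      · simp only [pvFdup, h, if_false, List.toFinset_cons, List.nil_append, List.length_cons]
        rw [Finset.card_insert_of_notMem (by simpa using h)]
        omega

theorem pvLenGdup : ∀ (suf : List Char) (seen : PySem.Set Char),
    (pvGdup seen suf).length + (suf.toFinset \ seen.toFinset).card = suf.length := by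
  intro suf
  induction suf with
  | nil => intro seen; simp [pvGdup]
  | cons c tl ih =>
      intro seen
      by_cases h : PySem.Set.contains seen c
      · have hc : c ∈ seen := (PySem.Set.contains_iff _ _).mp h
        have he : (c :: tl).toFinset \ seen.toFinset = tl.toFinset \ seen.toFinset := by
          ext x
          simp only [List.toFinset_cons, Finset.mem_sdiff, Finset.mem_insert, List.mem_toFinset]
          constructor
          · rintro ⟨hx | hx, hns⟩
            · exact absurd (hx ▸ hc) hns
            · exact ⟨hx, hns⟩
          · rintro ⟨hx, hns⟩; exact ⟨Or.inr hx, hns⟩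
        simp only [pvGdup, h, if_true, List.length_cons, he]
        have := ih seen
        omega
      · have hc : c ∉ seen := fun hm => h ((PySem.Set.contains_iff _ _).mpr hm)
        have hadd : (PySem.Set.add seen c).toFinset = insert c seen.toFinset := by
          rw [PySem.Set.add_of_not_mem hc]
          ext x
          simp only [List.toFinset_append, Finset.mem_union, List.toFinset_cons,
            List.toFinset_nil, Finset.mem_insert, List.mem_toFinset, insert_empty_eq,
            Finset.mem_singleton]
          tauto
        have he1 : (c :: tl).toFinset \ seen.toFinset
            = insert c ((tl.toFinset \ seen.toFinset).erase c) := by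
          ext x
          simp only [List.toFinset_cons, Finset.mem_sdiff, Finset.mem_insert, Finset.mem_erase,
            List.mem_toFinset]
          constructor
          · rintro ⟨hx | hx, hns⟩
            · exact Or.inl hx
            · by_cases hxc : x = c
              · exact Or.inl hxc
              · exact Or.inr ⟨hxc, hx, hns⟩
          · rintro (rfl | ⟨hxc, hx, hns⟩)
            · exact ⟨Or.inl rfl, hc⟩
            · exact ⟨Or.inr hx, hns⟩
        have he2 : tl.toFinset \ (PySem.Set.add seen c).toFinset
            = (tl.toFinset \ seen.toFinset).erase c := by
          rw [hadd]
          ext x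
          simp only [Finset.mem_sdiff, Finset.mem_insert, Finset.mem_erase, List.mem_toFinset]
          tauto
        simp only [pvGdup, h, Bool.false_eq_true, if_false, List.length_cons, he1]
        rw [Finset.card_insert_of_notMem (Finset.notMem_erase _ _)]
        have := ih (PySem.Set.add seen c)
        rw [he2] at this
        omega

theorem pvMemFdup : ∀ (l : List Char) (x : String),
    x ∈ pvFdup l → ∃ c, x = String.ofList [c] ∧ 1 < l.count c := by
  intro l
  induction l with
  | nil => intro x hx; simp [pvFdup] at hx
  | cons c tl ih =>
      intro x hx
      by_cases h : c ∈ tl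
      · simp only [pvFdup, h, if_true, List.mem_append, List.mem_singleton] at hx
        rcases hx with hx | hx
        · refine ⟨c, hx, ?_⟩
          have hpos : 0 < tl.count c := List.count_pos_iff.mpr h
          rw [List.count_cons_self]
          omega
        · obtain ⟨d, hd, hcnt⟩ := ih x hx
          exact ⟨d, hd, lt_of_lt_of_le hcnt (List.count_le_count_cons)⟩
      · simp only [pvFdup, h, if_false, List.nil_append] at hx
        obtain ⟨d, hd, hcnt⟩ := ih x hx
        exact ⟨d, hd, lt_of_lt_of_le hcnt (List.count_le_count_cons)⟩

theorem pvGdupOfDup : ∀ (suf : List Char) (seen : PySem.Set Char) (c : Char),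
    (1 < suf.count c ∨ (c ∈ seen ∧ c ∈ suf)) → String.ofList [c] ∈ pvGdup seen suf := by
  intro suf
  induction suf with
  | nil =>
      intro seen c h
      rcases h with h | ⟨_, h2⟩
      · simp at h
      · simp at h2
  | cons a tl ih =>
      intro seen c h
      by_cases hs : PySem.Set.contains seen a
      · simp only [pvGdup, hs, if_true]
        rcases h with hcnt | ⟨hseen, hmem⟩
        · by_cases hca : c = a
          · exact hca ▸ List.mem_cons_self
          · have hcnt' : 1 < tl.count c := by
              rw [List.count_cons, beq_eq_false_iff_ne.mpr (fun h : a = c => hca h.symm)] at hcnt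
              simpa using hcnt
            exact List.mem_cons_of_mem _ (ih seen c (Or.inl hcnt'))
        · by_cases hca : c = a
          · exact hca ▸ List.mem_cons_self
          · have hmem' : c ∈ tl := by
              rcases List.mem_cons.mp hmem with h1 | h1
              · exact absurd h1 hca
              · exact h1
            exact List.mem_cons_of_mem _ (ih seen c (Or.inr ⟨hseen, hmem'⟩))
      · have ha : a ∉ seen := fun hm => hs ((PySem.Set.contains_iff _ _).mpr hm)
        simp only [pvGdup, hs, Bool.false_eq_true, if_false]
        have hamem : a ∈ PySem.Set.add seen a := (PySem.Set.mem_add _ _ _).mpr (Or.inr rfl)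
        rcases h with hcnt | ⟨hseen, hmem⟩
        · by_cases hca : c = a
          · subst hca
            rw [List.count_cons_self] at hcnt
            have hmem : c ∈ tl := List.count_pos_iff.mp (by omega)
            exact ih _ c (Or.inr ⟨hamem, hmem⟩)
          · have hcnt' : 1 < tl.count c := by
              rw [List.count_cons, beq_eq_false_iff_ne.mpr (fun h : a = c => hca h.symm)] at hcnt
              simpa using hcnt
            exact ih _ c (Or.inl hcnt')
        · have hca : c ≠ a := fun he => ha (he ▸ hseen)
          have hmem' : c ∈ tl := by
            rcases List.mem_cons.mp hmem with h1 | h1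
            · exact absurd h1 hca
            · exact h1
          have hcseen : c ∈ PySem.Set.add seen a := (PySem.Set.mem_add _ _ _).mpr (Or.inl hseen)
          exact ih _ c (Or.inr ⟨hcseen, hmem'⟩)

-- lengths agree, and in the singleton case the lists agree
theorem pvCore (l : List Char) :
    (if (pvFdup l).length = 1 then some (pvFdup l) else none)
    = (if (pvGdup PySem.Set.empty l).length = 1 then some (pvGdup PySem.Set.empty l) else none) := by
  have hlen : (pvFdup l).length = (pvGdup PySem.Set.empty l).length := by
    have h1 := pvLenFdup l
    have h2 := pvLenGdup l PySem.Set.empty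
    have hemp : (PySem.Set.empty : PySem.Set Char).toFinset = ∅ := rfl
    rw [hemp, Finset.sdiff_empty] at h2
    omega
  by_cases h : (pvFdup l).length = 1
  · rw [if_pos h, if_pos (hlen ▸ h)]
    obtain ⟨a, ha⟩ := pvSingle _ h
    obtain ⟨b, hb⟩ := pvSingle _ (hlen ▸ h)
    obtain ⟨c, hac, hcnt⟩ := pvMemFdup l a (by rw [ha]; exact List.mem_cons_self)
    have hcg : String.ofList [c] ∈ pvGdup PySem.Set.empty l := pvGdupOfDup l _ c (Or.inl hcnt)
    rw [hb, List.mem_singleton] at hcg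
    rw [ha, hb, hac, hcg]
  · rw [if_neg h, if_neg (hlen ▸ h)]

-- ===== VERDICT (by name: the statement is the Claim_ definition above) =====
theorem buscar_primera_repetida_spec : Claim_equal_buscar_primera_repetida := by
  intro t _
  simp only [Spec_buscar_primera_repetida, buscar_primera_repetida, buscar_primera_repetida_alt]
  generalize (PySem.Str.replace (PySem.Str.lower t) " " "").toList = l
  have hA : (PySem.List.pyRange 0 ((l.length : Int) - 1) 1).foldl
      (fun r i => pvInnerA l i r (PySem.List.pyRange 0 ((l.length : Int) - i - 1) 1)) []
      = pvFdup l := by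
    have := pvOuterA l l.length 0 [] (by omega)
    simpa using this
  have hB : (l.foldl
      (fun (p : PySem.Set Char × List String) ch =>
        if PySem.Set.contains p.1 ch then (p.1, p.2 ++ [String.ofList [ch]])
        else (PySem.Set.add p.1 ch, p.2))
      (PySem.Set.empty, [])).2 = pvGdup PySem.Set.empty l := by
    simpa using pvFoldB l PySem.Set.empty []
  rw [hA, hB]
  exact pvCore l
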